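-- pv_equiv track=rewrite | github.com/Sierraki/Solutions | 力扣&Leetcode/算法&algorithm/LCS 01.下载插件.py | leastMinutes
-- ===== SOURCE A (Python) =====
-- def leastMinutes(n: int) -> int:
--     if n <= 2:
--         return n
--     tar = 1
--     ans = 1
--     while ans < n:
--         tar += 1
--         ans = 2**tar
--     return tar + 1
-- ===== SOURCE B (Python) =====
-- def leastMinutes(n: int) -> int:
--     if n <= 2:
--         return n
--     return (n - 1).bit_length() + 1
-- ===== Notes on version B (the rewrite author's own statement) =====
-- stated objective: simpler
-- what changed: Replaces the doubling while-loop that searches for the smallest power of two >= n with a closed-form bit_length computation (ceil(log2 n) + 1).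
import Mathlib
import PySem

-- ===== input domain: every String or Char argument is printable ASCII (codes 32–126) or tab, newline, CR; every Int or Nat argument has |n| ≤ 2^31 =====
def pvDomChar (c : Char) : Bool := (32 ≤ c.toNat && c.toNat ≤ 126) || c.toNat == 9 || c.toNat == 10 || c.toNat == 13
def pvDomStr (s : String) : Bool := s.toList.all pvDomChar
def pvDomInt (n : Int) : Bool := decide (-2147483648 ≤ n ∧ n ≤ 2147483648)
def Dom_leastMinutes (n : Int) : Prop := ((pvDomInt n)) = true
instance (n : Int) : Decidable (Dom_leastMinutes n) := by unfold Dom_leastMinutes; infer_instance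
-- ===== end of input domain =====

-- B replaces A's doubling while-loop with the closed form (n-1).bit_length() + 1 (simpler).

-- ===== PORT A =====
-- A's while-loop: the variable `ans` always equals 2^tar once the loop body has run,
-- so the loop state is `tar`; the initial check `ans = 1 < n` is performed explicitly
-- before entering the loop below.
def leastMinutesLoop (n : Int) (tar : Nat) : Int :=
  if h : (2 : Int) ^ tar < n then
    leastMinutesLoop n (tar + 1)
  else
    (tar : Int) + 1
termination_by n.toNat + 1 - tar
decreasing_by
  have h2 : (tar : Int) < (2 : Int) ^ tar := by
    have := Nat.lt_two_pow_self (n := tar)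
    exact_mod_cast (by push_cast; exact_mod_cast this : (tar : Int) < ((2 ^ tar : Nat) : Int))
  omega

def leastMinutes (n : Int) : Int :=
  if n ≤ 2 then n
  else if (1 : Int) < n then leastMinutesLoop n 1
  else (1 : Int) + 1

-- ===== PORT B =====
-- Python's int.bit_length() on a nonnegative integer, transliterated over Nat.
def bitLength (m : Nat) : Nat :=
  if m = 0 then 0 else bitLength (m / 2) + 1

def leastMinutes_alt (n : Int) : Int :=
  if n ≤ 2 then n
  else (bitLength (n - 1).toNat : Int) + 1

-- ===== PRECONDITION & SPEC =====
def Spec_leastMinutes (n : Int) (out : Int) : Prop := out = leastMinutes_alt n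
instance (n : Int) (out : Int) : Decidable (Spec_leastMinutes n out) := by unfold Spec_leastMinutes; infer_instance

-- ===== CLAIM (what is proved, stated in full; the proofs are below) =====
def Claim_equal_leastMinutes : Prop := ∀ (n : Int), Dom_leastMinutes n → Spec_leastMinutes n (leastMinutes n)

-- ===== LEMMAS AND PROOFS =====

theorem bitLength_lt (m : Nat) : m < 2 ^ bitLength m := by
  induction m using Nat.strong_induction_on with
  | _ m ih =>
    unfold bitLength
    split
    · omega
    · rename_i hm
      have := ih (m / 2) (by omega)
      have h2 : 2 ^ (bitLength (m / 2) + 1) = 2 * 2 ^ bitLength (m / 2) := by ring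
      omega

theorem le_bitLength (m : Nat) (hm : 0 < m) : 2 ^ (bitLength m - 1) ≤ m := by
  induction m using Nat.strong_induction_on with
  | _ m ih =>
    unfold bitLength
    split
    · omega
    · rename_i hm0
      by_cases h : m / 2 = 0
      · simp [h, bitLength]
        omega
      · have := ih (m / 2) (by omega) (by omega)
        have hb : 0 < bitLength (m / 2) := by
          unfold bitLength; split; · omega
          · omega
        have h2 : 2 ^ bitLength (m / 2) = 2 * 2 ^ (bitLength (m / 2) - 1) := by
          rw [← pow_succ']
          congr 1
          omega
        simp only [Nat.add_sub_cancel]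
        omega

theorem bitLength_eq_of (m k : Nat) (hk : 0 < k) (h1 : 2 ^ (k - 1) ≤ m) (h2 : m < 2 ^ k) :
    bitLength m = k := by
  have hm : 0 < m := lt_of_lt_of_le (Nat.pow_pos (by omega)) h1
  have ha := bitLength_lt m
  have hb := le_bitLength m hm
  by_contra hne
  rcases Nat.lt_or_ge (bitLength m) k with h | h
  · have : 2 ^ (k - 1) < 2 ^ bitLength m := lt_of_le_of_lt h1 ha
    have := Nat.pow_le_pow_right (n := 2) (by omega) (show bitLength m ≤ k - 1 by omega)
    omega
  · have hk2 : k ≤ bitLength m - 1 := by omega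
    have : 2 ^ k ≤ 2 ^ (bitLength m - 1) := Nat.pow_le_pow_right (by omega) hk2
    omega

theorem loop_eq (n : Int) (tar : Nat) :
    3 ≤ n → 0 < tar → (2 : Int) ^ (tar - 1) < n →
      leastMinutesLoop n tar = (bitLength (n - 1).toNat : Int) + 1 := by
  induction tar using leastMinutesLoop.induct n with
  | case1 tar h ih =>
    intro hn htar hlow
    unfold leastMinutesLoop
    rw [dif_pos h]
    exact ih hn (by omega) (by simpa using h)
  | case2 tar h =>
    intro hn htar hlow
    unfold leastMinutesLoop
    rw [dif_neg h]
    replace h : n ≤ 2 ^ tar := by omega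
    congr 1
    have hcast : ∀ k : Nat, ((2 ^ k : Nat) : Int) = (2 : Int) ^ k := by
      intro k; push_cast; ring
    have h1 : 2 ^ (tar - 1) ≤ (n - 1).toNat := by
      have : (2 : Int) ^ (tar - 1) ≤ n - 1 := by omega
      rw [← hcast (tar - 1)] at this
      omega
    have h2 : (n - 1).toNat < 2 ^ tar := by
      have : (n : Int) - 1 < (2 : Int) ^ tar := by omega
      rw [← hcast tar] at this
      omega
    have := bitLength_eq_of (n - 1).toNat tar htar h1 h2
    omega

-- ===== VERDICT (by name: the statement is the Claim_ definition above) =====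
theorem leastMinutes_spec : Claim_equal_leastMinutes := by
  intro n _
  unfold Spec_leastMinutes leastMinutes leastMinutes_alt
  by_cases h : n ≤ 2
  · simp [h]
  · have hn : 3 ≤ n := by omega
    simp only [if_neg (by omega : ¬ n ≤ 2), if_pos (by omega : (1 : Int) < n)]
    exact loop_eq n 1 hn (by omega) (by norm_num; omega)
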